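-- pv_equiv track=rewrite | github.com/Jonathan0607/T-mobile-winners | example_multi_index_usage.py | summarize_documents
-- ===== SOURCE A (Python) =====
-- from collections import Counter, defaultdict
--
-- def summarize_documents(index_type: str, docs: list) -> str:
--     """Generate a human-readable summary of all documents collected from an index."""
--     if not docs:
--         return f"No documents found in {index_type} index."
--     lines = [f"Summary for {index_type} index", "=" * 60, f"Total Documents: {len(docs)}"]
--     # Common fields
--     sentiments = Counter()
--     categories = Counter()
--     dates = Counter()
--     extra_fields = defaultdict(Counter)
--     rating_counter = Counter()
--     score_counter = Counter()
--     app_counter = Counter()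
--     subreddit_counter = Counter()
--
--     for d in docs:
--         sentiments[str(d.get('sentiment',''))] += 1
--         categories[str(d.get('category',''))] += 1
--         dates[str(d.get('date',''))] += 1
--         if index_type == 'playstore':
--             app_counter[str(d.get('app_name',''))] += 1
--             if 'rating' in d and d.get('rating') is not None:
--                 rating_counter[int(d.get('rating'))] += 1
--         if index_type == 'reddit':
--             subreddit_counter[str(d.get('subreddit',''))] += 1
--             if 'score' in d and d.get('score') is not None:
--                 score_counter[int(d.get('score'))] += 1
--
--     lines.append("\nTop Sentiments:")
--     for k,v in sentiments.most_common():
--         if k: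
--             lines.append(f"  {k}: {v}")
--     lines.append("\nTop Categories:")
--     for k,v in categories.most_common(15):
--         if k:
--             lines.append(f"  {k}: {v}")
--
--     if index_type == 'playstore':
--         lines.append("\nTop Apps:")
--         for k,v in app_counter.most_common():
--             if k:
--                 lines.append(f"  {k}: {v}")
--         lines.append("\nRatings Distribution:")
--         for r in sorted(rating_counter.keys(), reverse=True):
--             lines.append(f"  {r} stars: {rating_counter[r]}")
--     elif index_type == 'reddit':
--         lines.append("\nSubreddit Distribution:")
--         for k,v in subreddit_counter.most_common():
--             if k:
--                 lines.append(f"  {k}: {v}")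
--         # Score distribution buckets
--         score_buckets = {"<=0":0, "1-10":0, "11-50":0, ">50":0}
--         for s,count in score_counter.items():
--             if s <= 0:
--                 score_buckets['<=0'] += 1
--             elif s <= 10:
--                 score_buckets['1-10'] += 1
--             elif s <= 50:
--                 score_buckets['11-50'] += 1
--             else:
--                 score_buckets['>50'] += 1
--         lines.append("\nScore Buckets:")
--         for k,v in score_buckets.items():
--             lines.append(f"  {k}: {v}")
--
--     lines.append("\nDate Span:")
--     non_empty_dates = [d for d in dates.keys() if d and d.lower() != 'none']
--     if non_empty_dates:
--         lines.append(f"  Earliest: {min(non_empty_dates)}")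
--         lines.append(f"  Latest: {max(non_empty_dates)}")
--     else:
--         lines.append("  No valid dates")
--
--     return "\n".join(lines)
-- ===== SOURCE B (Python) =====
-- from collections import Counter
--
-- def summarize_documents(index_type: str, docs: list) -> str:
--     """Generate a human-readable summary of all documents collected from an index."""
--     if not docs:
--         return f"No documents found in {index_type} index."
--     lines = [f"Summary for {index_type} index", "=" * 60, f"Total Documents: {len(docs)}"]
--
--     lines.append("\nTop Sentiments:")
--     sentiments = Counter(str(d.get('sentiment', '')) for d in docs)
--     lines.extend(f"  {k}: {v}" for k, v in sentiments.most_common() if k)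
--
--     lines.append("\nTop Categories:")
--     categories = Counter(str(d.get('category', '')) for d in docs)
--     lines.extend(f"  {k}: {v}" for k, v in categories.most_common(15) if k)
--
--     if index_type == 'playstore':
--         lines.append("\nTop Apps:")
--         apps = Counter(str(d.get('app_name', '')) for d in docs)
--         lines.extend(f"  {k}: {v}" for k, v in apps.most_common() if k)
--         lines.append("\nRatings Distribution:")
--         ratings = Counter(int(d['rating']) for d in docs
--                           if 'rating' in d and d['rating'] is not None)
--         lines.extend(f"  {r} stars: {ratings[r]}" for r in sorted(ratings, reverse=True))
--     elif index_type == 'reddit':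
--         lines.append("\nSubreddit Distribution:")
--         subs = Counter(str(d.get('subreddit', '')) for d in docs)
--         lines.extend(f"  {k}: {v}" for k, v in subs.most_common() if k)
--         # buckets count DISTINCT score values, as the original does
--         scores = {int(d['score']) for d in docs if 'score' in d and d['score'] is not None}
--         lines.append("\nScore Buckets:")
--         lines.append(f"  <=0: {sum(1 for s in scores if s <= 0)}")
--         lines.append(f"  1-10: {sum(1 for s in scores if 0 < s <= 10)}")
--         lines.append(f"  11-50: {sum(1 for s in scores if 10 < s <= 50)}")
--         lines.append(f"  >50: {sum(1 for s in scores if 50 < s)}")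
--
--     lines.append("\nDate Span:")
--     valid_dates = [x for x in (str(d.get('date', '')) for d in docs)
--                    if x and x.lower() != 'none']
--     if valid_dates:
--         lines.append(f"  Earliest: {min(valid_dates)}")
--         lines.append(f"  Latest: {max(valid_dates)}")
--     else:
--         lines.append("  No valid dates")
--
--     return "\n".join(lines)
-- ===== Notes on version B (the rewrite author's own statement) =====
-- stated objective: idiomatic
-- what changed: A's single fused aggregation loop over docs (seven counters updated in one pass, bucket counts accumulated by an elif chain over Counter items) is replaced by per-section comprehensions: each Counter is built inline where its section is printed, score buckets become direct counts over the distinct-score set, and the date span is taken from the raw value list instead of Counter keys.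
import Mathlib
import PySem

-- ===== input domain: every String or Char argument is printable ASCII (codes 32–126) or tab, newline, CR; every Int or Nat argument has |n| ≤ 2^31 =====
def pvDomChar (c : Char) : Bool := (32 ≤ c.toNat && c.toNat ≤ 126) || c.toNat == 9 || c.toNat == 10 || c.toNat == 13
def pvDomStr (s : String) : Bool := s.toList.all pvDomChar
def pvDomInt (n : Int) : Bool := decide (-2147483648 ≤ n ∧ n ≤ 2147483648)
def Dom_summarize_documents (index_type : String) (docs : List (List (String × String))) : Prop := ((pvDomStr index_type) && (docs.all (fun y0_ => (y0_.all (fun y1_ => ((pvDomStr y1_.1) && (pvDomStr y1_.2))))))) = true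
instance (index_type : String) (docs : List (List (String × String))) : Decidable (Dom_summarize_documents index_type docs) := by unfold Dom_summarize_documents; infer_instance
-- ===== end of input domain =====

-- B replaces A's single fused aggregation loop by per-section comprehensions (one Counter/set built
-- where each section is printed, set-based bucket counts, list-based date span): objective 'idiomatic'.

-- shared lookups both Pythons perform on a document dict
def pvStrKey (key : String) (dp : List (String × String)) : String :=
  (PySem.Dict.ofList dp).getD key ""
def pvHas (key : String) (dp : List (String × String)) : Bool :=
  (PySem.Dict.ofList dp).contains key
-- int(d[key]) on a string value; the ValueError case (ofStr? = none) is excluded by Pre_, .getD 0 is never reached there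
def pvIntVal (key : String) (dp : List (String × String)) : Int :=
  (PySem.Int.ofStr? ((PySem.Dict.ofList dp).getD key "")).getD 0
def pvFmt (kv : String × Int) : String := "  " ++ kv.1 ++ ": " ++ PySem.Int.toStr kv.2
-- Counter.most_common(): stable sort of the items by count, descending
def pvMostCommon (c : PySem.Dict String Int) : List (String × Int) :=
  PySem.List.sorted c.items (fun p => p.2) true
def pvEq60 : String := "============================================================"

-- ===== PORT A =====
abbrev aSt : Type := PySem.Dict String Int × PySem.Dict String Int × PySem.Dict String Int ×
  PySem.Dict String Int × PySem.Dict Int Int × PySem.Dict String Int × PySem.Dict Int Int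

-- the body of A's single 'for d in docs' loop: (sentiments, categories, dates, app, rating, subreddit, score)
def aF (it : String) (st : aSt) (dp : List (String × String)) : aSt :=
  (st.1.modify (pvStrKey "sentiment" dp) 0 (· + 1),
   st.2.1.modify (pvStrKey "category" dp) 0 (· + 1),
   st.2.2.1.modify (pvStrKey "date" dp) 0 (· + 1),
   (if it = "playstore" then st.2.2.2.1.modify (pvStrKey "app_name" dp) 0 (· + 1) else st.2.2.2.1),
   (if it = "playstore" then
      (if pvHas "rating" dp then st.2.2.2.2.1.modify (pvIntVal "rating" dp) 0 (· + 1) else st.2.2.2.2.1)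
    else st.2.2.2.2.1),
   (if it = "reddit" then st.2.2.2.2.2.1.modify (pvStrKey "subreddit" dp) 0 (· + 1) else st.2.2.2.2.2.1),
   (if it = "reddit" then
      (if pvHas "score" dp then st.2.2.2.2.2.2.modify (pvIntVal "score" dp) 0 (· + 1) else st.2.2.2.2.2.2)
    else st.2.2.2.2.2.2))

def aLoop (it : String) (docs : List (List (String × String))) : aSt :=
  docs.foldl (aF it)
    (PySem.Dict.empty, PySem.Dict.empty, PySem.Dict.empty, PySem.Dict.empty,
     PySem.Dict.empty, PySem.Dict.empty, PySem.Dict.empty)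

-- 'for k,v in …: if k: lines.append(f"  {k}: {v}")'
def aCommonLoop (kvs : List (String × Int)) (ls : List String) : List String :=
  kvs.foldl (fun acc kv => if !(kv.1 == "") then acc ++ [pvFmt kv] else acc) ls

-- 'for r in sorted(rating_counter.keys(), reverse=True): …'
def aRatingLoop (rat : PySem.Dict Int Int) (ls : List String) : List String :=
  (PySem.List.sorted rat.keys (fun x => x) true).foldl
    (fun acc r => acc ++ ["  " ++ PySem.Int.toStr r ++ " stars: " ++ PySem.Int.toStr (rat.getD r 0)]) ls

-- 'for s,count in score_counter.items(): …' over the four buckets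
def aBuckets (sco : PySem.Dict Int Int) : Int × Int × Int × Int :=
  sco.items.foldl (fun b p =>
    if p.1 ≤ 0 then (b.1 + 1, b.2.1, b.2.2.1, b.2.2.2)
    else if p.1 ≤ 10 then (b.1, b.2.1 + 1, b.2.2.1, b.2.2.2)
    else if p.1 ≤ 50 then (b.1, b.2.1, b.2.2.1 + 1, b.2.2.2)
    else (b.1, b.2.1, b.2.2.1, b.2.2.2 + 1)) (0, 0, 0, 0)

def aDateLines (dat : PySem.Dict String Int) : List String :=
  let ned := dat.keys.filter (fun s => !(s == "") && !(PySem.Str.lower s == "none"))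
  if ned ≠ [] then
    ["  Earliest: " ++ ((PySem.List.min? ned (fun x => x)).getD ""),
     "  Latest: " ++ ((PySem.List.max? ned (fun x => x)).getD "")]
  else ["  No valid dates"]

def summarize_documents (index_type : String) (docs : List (List (String × String))) : String :=
  if docs = [] then "No documents found in " ++ index_type ++ " index."
  else
    let st := aLoop index_type docs
    let l1 : List String :=
      ["Summary for " ++ index_type ++ " index", pvEq60,
       "Total Documents: " ++ PySem.Int.toStr (docs.length : Int), "\nTop Sentiments:"]
    let l2 := aCommonLoop (pvMostCommon st.1) l1
    let l3 := aCommonLoop ((pvMostCommon st.2.1).take 15) (l2 ++ ["\nTop Categories:"])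
    let l4 :=
      if index_type = "playstore" then
        aRatingLoop st.2.2.2.2.1
          (aCommonLoop (pvMostCommon st.2.2.2.1) (l3 ++ ["\nTop Apps:"]) ++ ["\nRatings Distribution:"])
      else if index_type = "reddit" then
        let sl := aCommonLoop (pvMostCommon st.2.2.2.2.2.1) (l3 ++ ["\nSubreddit Distribution:"])
        let b := aBuckets st.2.2.2.2.2.2
        sl ++ ["\nScore Buckets:",
               "  <=0: " ++ PySem.Int.toStr b.1, "  1-10: " ++ PySem.Int.toStr b.2.1,
               "  11-50: " ++ PySem.Int.toStr b.2.2.1, "  >50: " ++ PySem.Int.toStr b.2.2.2]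
      else l3
    PySem.Str.join "\n" (l4 ++ ["\nDate Span:"] ++ aDateLines st.2.2.1)

-- ===== PORT B =====
-- 'Counter(str(d.get(key, "")) for d in docs)'
def bCounter (key : String) (docs : List (List (String × String))) : PySem.Dict String Int :=
  PySem.Dict.counter (docs.map (pvStrKey key))
-- '[int(d[key]) for d in docs if key in d and d[key] is not None]'
def bIntList (key : String) (docs : List (List (String × String))) : List Int :=
  (docs.filter (pvHas key)).map (pvIntVal key)
-- '[f"  {k}: {v}" for k,v in kvs if k]'
def bCommon (kvs : List (String × Int)) : List String :=
  (kvs.filter (fun kv => !(kv.1 == ""))).map pvFmt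

def summarize_documents_alt (index_type : String) (docs : List (List (String × String))) : String :=
  if docs = [] then "No documents found in " ++ index_type ++ " index."
  else
    let l1 : List String :=
      ["Summary for " ++ index_type ++ " index", pvEq60,
       "Total Documents: " ++ PySem.Int.toStr (docs.length : Int), "\nTop Sentiments:"]
    let l2 := l1 ++ bCommon (pvMostCommon (bCounter "sentiment" docs))
    let l3 := l2 ++ ["\nTop Categories:"] ++ bCommon ((pvMostCommon (bCounter "category" docs)).take 15)
    let l4 :=
      if index_type = "playstore" then
        let ratings := PySem.Dict.counter (bIntList "rating" docs)
        l3 ++ ["\nTop Apps:"] ++ bCommon (pvMostCommon (bCounter "app_name" docs))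
           ++ ["\nRatings Distribution:"]
           ++ (PySem.List.sorted ratings.keys (fun x => x) true).map
                (fun r => "  " ++ PySem.Int.toStr r ++ " stars: " ++ PySem.Int.toStr (ratings.getD r 0))
      else if index_type = "reddit" then
        let scores := PySem.Set.ofList (bIntList "score" docs)
        l3 ++ ["\nSubreddit Distribution:"] ++ bCommon (pvMostCommon (bCounter "subreddit" docs))
           ++ ["\nScore Buckets:",
               "  <=0: " ++ PySem.Int.toStr (scores.countP (fun s => decide (s ≤ 0)) : Int),
               "  1-10: " ++ PySem.Int.toStr (scores.countP (fun s => decide (0 < s) && decide (s ≤ 10)) : Int),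
               "  11-50: " ++ PySem.Int.toStr (scores.countP (fun s => decide (10 < s) && decide (s ≤ 50)) : Int),
               "  >50: " ++ PySem.Int.toStr (scores.countP (fun s => decide (50 < s)) : Int)]
      else l3
    let valid := (docs.map (pvStrKey "date")).filter (fun s => !(s == "") && !(PySem.Str.lower s == "none"))
    PySem.Str.join "\n" (l4 ++ ["\nDate Span:"] ++
      (if valid ≠ [] then
        ["  Earliest: " ++ ((PySem.List.min? valid (fun x => x)).getD ""),
         "  Latest: " ++ ((PySem.List.max? valid (fun x => x)).getD "")]
       else ["  No valid dates"]))

-- ===== PRECONDITION & SPEC =====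
-- Pre_ excludes exactly the inputs on which Python A raises ValueError: a 'playstore' run with a
-- 'rating' value (resp. a 'reddit' run with a 'score' value) that int() cannot parse.
def Pre_summarize_documents (index_type : String) (docs : List (List (String × String))) : Prop :=
  (index_type = "playstore" →
    docs.all (fun dp => ((PySem.Dict.ofList dp).get? "rating").all (fun v => (PySem.Int.ofStr? v).isSome)) = true) ∧
  (index_type = "reddit" →
    docs.all (fun dp => ((PySem.Dict.ofList dp).get? "score").all (fun v => (PySem.Int.ofStr? v).isSome)) = true)
instance (index_type : String) (docs : List (List (String × String))) : Decidable (Pre_summarize_documents index_type docs) := by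
  unfold Pre_summarize_documents; infer_instance

def pvWitness_summarize_documents : String × (List (List (String × String))) :=
  ("reddit", [[("score", "5"), ("subreddit", "aww"), ("date", "2020-01-01")], [("sentiment", "pos")]])

def Spec_summarize_documents (index_type : String) (docs : List (List (String × String))) (out : String) : Prop := out = summarize_documents_alt index_type docs
instance (index_type : String) (docs : List (List (String × String))) (out : String) : Decidable (Spec_summarize_documents index_type docs out) := by unfold Spec_summarize_documents; infer_instance

-- ===== CLAIM (what is proved, stated in full; the proofs are below) =====
def Claim_equal_summarize_documents : Prop := ∀ (index_type : String) (docs : List (List (String × String))), Dom_summarize_documents index_type docs → Pre_summarize_documents index_type docs → Spec_summarize_documents index_type docs (summarize_documents index_type docs)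

-- ===== LEMMAS AND PROOFS =====

-- the fused fold over a 7-tuple is the tuple of the seven independent folds
theorem aF_split (it : String) (docs : List (List (String × String))) : ∀ (st : aSt),
    docs.foldl (aF it) st =
      (docs.foldl (fun c dp => c.modify (pvStrKey "sentiment" dp) 0 (· + 1)) st.1,
       docs.foldl (fun c dp => c.modify (pvStrKey "category" dp) 0 (· + 1)) st.2.1,
       docs.foldl (fun c dp => c.modify (pvStrKey "date" dp) 0 (· + 1)) st.2.2.1,
       docs.foldl (fun c dp => if it = "playstore" then c.modify (pvStrKey "app_name" dp) 0 (· + 1) else c) st.2.2.2.1,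
       docs.foldl (fun c dp => if it = "playstore" then
           (if pvHas "rating" dp then c.modify (pvIntVal "rating" dp) 0 (· + 1) else c) else c) st.2.2.2.2.1,
       docs.foldl (fun c dp => if it = "reddit" then c.modify (pvStrKey "subreddit" dp) 0 (· + 1) else c) st.2.2.2.2.2.1,
       docs.foldl (fun c dp => if it = "reddit" then
           (if pvHas "score" dp then c.modify (pvIntVal "score" dp) 0 (· + 1) else c) else c) st.2.2.2.2.2.2) := by
  induction docs with
  | nil => intro st; rfl
  | cons d t ih => intro st; simp only [List.foldl_cons]; rw [ih]; rfl

-- Counter(f(x) for x in xs) as the increment loop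
theorem counter_map_eq {α κ : Type} [BEq κ] (f : α → κ) (xs : List α) :
    PySem.Dict.counter (xs.map f) = xs.foldl (fun c x => c.modify (f x) 0 (· + 1)) PySem.Dict.empty := by
  rw [PySem.Dict.counter_eq_foldl, List.foldl_map]

-- Counter(f(x) for x in xs if p x) as the guarded increment loop
theorem counter_filter_map_eq {α κ : Type} [BEq κ] (p : α → Bool) (f : α → κ) (xs : List α) :
    PySem.Dict.counter ((xs.filter p).map f) =
      xs.foldl (fun c x => if p x then c.modify (f x) 0 (· + 1) else c) PySem.Dict.empty := by
  rw [counter_map_eq, List.foldl_filter]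

theorem aCommonLoop_eq (kvs : List (String × Int)) (ls : List String) :
    aCommonLoop kvs ls = ls ++ bCommon kvs := by
  unfold aCommonLoop bCommon
  exact PySem.List.foldl_append_if _ _ _ _

theorem aRatingLoop_eq (rat : PySem.Dict Int Int) (ls : List String) :
    aRatingLoop rat ls = ls ++ (PySem.List.sorted rat.keys (fun x => x) true).map
      (fun r => "  " ++ PySem.Int.toStr r ++ " stars: " ++ PySem.Int.toStr (rat.getD r 0)) := by
  unfold aRatingLoop
  exact PySem.List.foldl_append_singleton_eq_map _ _ _

-- the elif-chain bucket loop counts each predicate separately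
theorem bucketFold_eq (zs : List (Int × Int)) : ∀ (b : Int × Int × Int × Int),
    zs.foldl (fun b p =>
      if p.1 ≤ 0 then (b.1 + 1, b.2.1, b.2.2.1, b.2.2.2)
      else if p.1 ≤ 10 then (b.1, b.2.1 + 1, b.2.2.1, b.2.2.2)
      else if p.1 ≤ 50 then (b.1, b.2.1, b.2.2.1 + 1, b.2.2.2)
      else (b.1, b.2.1, b.2.2.1, b.2.2.2 + 1)) b =
    (b.1 + (zs.countP (fun p => decide (p.1 ≤ 0)) : Int),
     b.2.1 + (zs.countP (fun p => decide (0 < p.1) && decide (p.1 ≤ 10)) : Int),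
     b.2.2.1 + (zs.countP (fun p => decide (10 < p.1) && decide (p.1 ≤ 50)) : Int),
     b.2.2.2 + (zs.countP (fun p => decide (50 < p.1)) : Int)) := by
  induction zs with
  | nil => intro b; simp [List.countP_nil]
  | cons z t ih =>
    intro b
    simp only [List.foldl_cons, List.countP_cons]
    rw [ih]
    clear ih
    rcases b with ⟨b0, b1, b2, b3⟩
    split_ifs with h0 h1 h2 <;> simp_all [Prod.ext_iff] <;> omega

-- min/max with the identity key depend only on the member set
theorem min_id_congr (xs ys : List String) (h : ∀ x, x ∈ xs ↔ x ∈ ys) :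
    PySem.List.min? xs (fun x => x) = PySem.List.min? ys (fun x => x) := by
  cases hx : PySem.List.min? xs (fun x => x) with
  | none =>
    rw [PySem.List.min?_eq_none_iff] at hx
    cases hy : PySem.List.min? ys (fun x => x) with
    | none => rfl
    | some m => exact absurd ((h m).mpr (PySem.List.min?_mem hy)) (by simp [hx])
  | some m =>
    cases hy : PySem.List.min? ys (fun x => x) with
    | none =>
      rw [PySem.List.min?_eq_none_iff] at hy
      exact absurd ((h m).mp (PySem.List.min?_mem hx)) (by simp [hy])
    | some m' =>
      have h1 := PySem.List.min?_isMin hx m' ((h m').mpr (PySem.List.min?_mem hy))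
      have h2 := PySem.List.min?_isMin hy m ((h m).mp (PySem.List.min?_mem hx))
      simp only [Option.some.injEq]
      exact le_antisymm h1 h2

theorem max_id_congr (xs ys : List String) (h : ∀ x, x ∈ xs ↔ x ∈ ys) :
    PySem.List.max? xs (fun x => x) = PySem.List.max? ys (fun x => x) := by
  cases hx : PySem.List.max? xs (fun x => x) with
  | none =>
    rw [PySem.List.max?_eq_none_iff] at hx
    cases hy : PySem.List.max? ys (fun x => x) with
    | none => rfl
    | some m => exact absurd ((h m).mpr (PySem.List.max?_mem hy)) (by simp [hx])
  | some m =>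
    cases hy : PySem.List.max? ys (fun x => x) with
    | none =>
      rw [PySem.List.max?_eq_none_iff] at hy
      exact absurd ((h m).mp (PySem.List.max?_mem hx)) (by simp [hy])
    | some m' =>
      have h1 := PySem.List.max?_isMax hx m' ((h m').mpr (PySem.List.max?_mem hy))
      have h2 := PySem.List.max?_isMax hy m ((h m).mp (PySem.List.max?_mem hx))
      simp only [Option.some.injEq]
      exact le_antisymm h2 h1

-- A's date section over the date Counter equals B's over the raw value list
theorem aDateLines_eq (dvals : List String) :
    aDateLines (PySem.Dict.counter dvals) =
      (if (dvals.filter (fun s => !(s == "") && !(PySem.Str.lower s == "none"))) ≠ [] then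
        ["  Earliest: " ++ ((PySem.List.min? (dvals.filter (fun s => !(s == "") && !(PySem.Str.lower s == "none"))) (fun x => x)).getD ""),
         "  Latest: " ++ ((PySem.List.max? (dvals.filter (fun s => !(s == "") && !(PySem.Str.lower s == "none"))) (fun x => x)).getD "")]
       else ["  No valid dates"]) := by
  simp only [aDateLines]
  have hmem : ∀ x, x ∈ (PySem.Dict.counter dvals).keys.filter (fun s => !(s == "") && !(PySem.Str.lower s == "none")) ↔
      x ∈ dvals.filter (fun s => !(s == "") && !(PySem.Str.lower s == "none")) := by
    intro x
    rw [PySem.Dict.keys_counter]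
    simp [List.mem_filter, PySem.Set.mem_ofList]
  have hne : ((PySem.Dict.counter dvals).keys.filter (fun s => !(s == "") && !(PySem.Str.lower s == "none")) ≠ []) ↔
      (dvals.filter (fun s => !(s == "") && !(PySem.Str.lower s == "none")) ≠ []) := by
    constructor <;> intro hne hcon <;> apply hne <;>
      rw [List.eq_nil_iff_forall_not_mem] at hcon ⊢ <;> intro x hx
    · exact hcon x ((hmem x).mp hx)
    · exact hcon x ((hmem x).mpr hx)
  rw [min_id_congr _ _ hmem, max_id_congr _ _ hmem]
  split_ifs <;> first | rfl | (exfalso; tauto)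

-- ===== VERDICT (by name: the statement is the Claim_ definition above) =====
theorem summarize_documents_spec : Claim_equal_summarize_documents := by
  intro it docs _ _
  unfold Spec_summarize_documents summarize_documents summarize_documents_alt
  by_cases hd : docs = []
  · simp [hd]
  simp only [if_neg hd]
  unfold aLoop
  rw [aF_split]
  simp only
  rw [show (docs.foldl (fun c dp => c.modify (pvStrKey "sentiment" dp) 0 (· + 1)) PySem.Dict.empty) = bCounter "sentiment" docs
        from (counter_map_eq _ _).symm,
      show (docs.foldl (fun c dp => c.modify (pvStrKey "category" dp) 0 (· + 1)) PySem.Dict.empty) = bCounter "category" docs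
        from (counter_map_eq _ _).symm,
      show (docs.foldl (fun c dp => c.modify (pvStrKey "date" dp) 0 (· + 1)) PySem.Dict.empty) = PySem.Dict.counter (docs.map (pvStrKey "date"))
        from (counter_map_eq _ _).symm]
  simp only [aCommonLoop_eq, aRatingLoop_eq, aDateLines_eq]
  by_cases hps : it = "playstore"
  · subst hps
    simp only [show (("playstore" : String) = "reddit") = False from by simp, if_true, if_false]
    rw [show (docs.foldl (fun c dp => c.modify (pvStrKey "app_name" dp) 0 (· + 1)) PySem.Dict.empty) = bCounter "app_name" docs
          from (counter_map_eq _ _).symm,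
        show (docs.foldl (fun c dp => if pvHas "rating" dp then c.modify (pvIntVal "rating" dp) 0 (· + 1) else c) PySem.Dict.empty)
            = PySem.Dict.counter (bIntList "rating" docs)
          from (counter_filter_map_eq _ _ _).symm]
  · by_cases hrd : it = "reddit"
    · subst hrd
      simp only [show (("reddit" : String) = "playstore") = False from by simp, if_true, if_false]
      rw [show (docs.foldl (fun c dp => c.modify (pvStrKey "subreddit" dp) 0 (· + 1)) PySem.Dict.empty) = bCounter "subreddit" docs
            from (counter_map_eq _ _).symm,
          show (docs.foldl (fun c dp => if pvHas "score" dp then c.modify (pvIntVal "score" dp) 0 (· + 1) else c) PySem.Dict.empty)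
              = PySem.Dict.counter (bIntList "score" docs)
            from (counter_filter_map_eq _ _ _).symm]
      unfold aBuckets
      rw [bucketFold_eq]
      rw [PySem.Dict.items_counter]
      simp [List.append_assoc, Function.comp_def]
    · simp only [eq_false hps, eq_false hrd, if_false]
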